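-- pv_equiv track=rewrite | github.com/LingDunn/COMP90024_A2_Project | Data_Analysis/preprocess/get_topic_tag.py | topic_cls
-- ===== SOURCE A (Python) =====
-- topics = ['web3', 'politics', 'porn']
--
-- sub_topics = ['cc', 'nft', 'scotty', 'ukraine']
--
-- def topic_cls(text, corpus1, corpus2):
--     topic = []
--     sub_topic = []
--     for i, corpus in enumerate(corpus1):
--         for word in corpus:
--             if word in text:
--                 topic.append(topics[i])
--                 for j, sub_corpus in enumerate(corpus2):
--                     for sub_word in sub_corpus:
--                         if sub_word in text and sub_topics[j] not in sub_topic: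
--                             sub_topic.append(sub_topics[j])
--                             break
--                 break
--     return topic, sub_topic
-- ===== SOURCE B (Python) =====
-- topics = ['web3', 'politics', 'porn']
--
-- sub_topics = ['cc', 'nft', 'scotty', 'ukraine']
--
-- def topic_cls(text, corpus1, corpus2):
--     topic = [t for c, t in zip(corpus1, topics) if any(w in text for w in c)]
--     if not topic:
--         return topic, []
--     sub_topic = [st for c, st in zip(corpus2, sub_topics) if any(w in text for w in c)]
--     return topic, sub_topic
-- ===== Notes on version B (the rewrite author's own statement) =====
-- stated objective: simpler
-- what changed: Replaces A's nested break-loops, which re-run the full corpus2 sub-topic scan (with dedup) once per matched topic, by two flat zip-comprehensions: one pass builds the topic list, and a single dedup-free sub-topic pass runs only when the topic list is non-empty.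
import Mathlib
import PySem

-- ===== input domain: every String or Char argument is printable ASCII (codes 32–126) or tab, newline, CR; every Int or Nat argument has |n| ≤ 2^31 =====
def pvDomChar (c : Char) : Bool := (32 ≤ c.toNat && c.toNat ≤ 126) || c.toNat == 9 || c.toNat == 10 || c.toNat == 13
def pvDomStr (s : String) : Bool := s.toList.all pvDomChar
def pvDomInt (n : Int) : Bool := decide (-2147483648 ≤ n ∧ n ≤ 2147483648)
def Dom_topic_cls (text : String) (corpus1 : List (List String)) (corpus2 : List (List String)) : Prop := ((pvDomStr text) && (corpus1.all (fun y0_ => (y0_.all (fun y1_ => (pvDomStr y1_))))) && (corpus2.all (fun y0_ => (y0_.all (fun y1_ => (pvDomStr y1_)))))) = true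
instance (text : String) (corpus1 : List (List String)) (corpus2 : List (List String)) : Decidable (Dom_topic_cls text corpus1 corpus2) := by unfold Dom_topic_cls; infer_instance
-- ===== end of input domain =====

-- B replaces A's nested break-loops and repeated inner sub-topic rescans by two zip-comprehensions
-- (one gated on the topic list being non-empty); objective: simpler.

-- ===== PORT A =====
-- the module constants `topics` and `sub_topics`
def pvTopics : List String := ["web3", "politics", "porn"]
def pvSubTopics : List String := ["cc", "nft", "scotty", "ukraine"]

-- `for sub_word in sub_corpus: if sub_word in text and sub_topics[j] not in sub_topic: append; break`
-- (the pyGetD default "" is only reached where Python raises IndexError; Pre_ excludes those inputs)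
def pvSubScanA (text : String) (j : Int) (sub_corpus subt : List String) : List String :=
  match sub_corpus with
  | [] => subt
  | w :: rest =>
      if PySem.Str.isIn w text && !(subt.contains (PySem.List.pyGetD pvSubTopics j "")) then
        subt ++ [PySem.List.pyGetD pvSubTopics j ""]
      else pvSubScanA text j rest subt

-- `for j, sub_corpus in enumerate(corpus2): …`
def pvInnerA (text : String) (corpus2 : List (List String)) (j : Int) (subt : List String) : List String :=
  match corpus2 with
  | [] => subt
  | sc :: rest => pvInnerA text rest (j + 1) (pvSubScanA text j sc subt)

-- `for word in corpus: if word in text: topic.append(topics[i]); <inner loops>; break`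
def pvWordScanA (text : String) (i : Int) (corpus : List String) (corpus2 : List (List String))
    (st : List String × List String) : List String × List String :=
  match corpus with
  | [] => st
  | w :: rest =>
      if PySem.Str.isIn w text then
        (st.1 ++ [PySem.List.pyGetD pvTopics i ""], pvInnerA text corpus2 0 st.2)
      else pvWordScanA text i rest corpus2 st

-- `for i, corpus in enumerate(corpus1): …`
def pvOuterA (text : String) (corpus1 corpus2 : List (List String)) (i : Int)
    (st : List String × List String) : List String × List String :=
  match corpus1 with
  | [] => st
  | c :: rest => pvOuterA text rest corpus2 (i + 1) (pvWordScanA text i c corpus2 st)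

def topic_cls (text : String) (corpus1 : List (List String)) (corpus2 : List (List String)) : List String × List String :=
  pvOuterA text corpus1 corpus2 0 ([], [])

-- ===== PORT B =====
-- `any(w in text for w in c)`
def pvAnyIn (text : String) (c : List String) : Bool := c.any (fun w => PySem.Str.isIn w text)

def topic_cls_alt (text : String) (corpus1 : List (List String)) (corpus2 : List (List String)) : List String × List String :=
  let topic := ((corpus1.zip pvTopics).filter (fun p => pvAnyIn text p.1)).map (fun p => p.2)
  if topic.isEmpty then (topic, [])
  else (topic, ((corpus2.zip pvSubTopics).filter (fun p => pvAnyIn text p.1)).map (fun p => p.2))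

-- ===== PRECONDITION & SPEC =====
-- Pre_ excludes exactly the inputs where A raises IndexError: a matching corpus at index ≥ 3 in
-- corpus1 (topics[i] raises), or — when some topic matched — a matching sub-corpus at index ≥ 4
-- in corpus2 (sub_topics[j] raises).  A returns normally on every input admitted here.
def Pre_topic_cls (text : String) (corpus1 : List (List String)) (corpus2 : List (List String)) : Prop :=
  (∀ i < corpus1.length, pvAnyIn text (corpus1.getD i []) = true → i < 3) ∧
  ((∃ c ∈ corpus1, pvAnyIn text c = true) →
    ∀ j < corpus2.length, pvAnyIn text (corpus2.getD j []) = true → j < 4)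
instance (text : String) (corpus1 : List (List String)) (corpus2 : List (List String)) : Decidable (Pre_topic_cls text corpus1 corpus2) := by unfold Pre_topic_cls; infer_instance

def pvWitness_topic_cls : String × List (List String) × List (List String) :=
  ("the cc of web3", [["web3"], ["election"]], [["cc"], ["nft"]])

def Spec_topic_cls (text : String) (corpus1 : List (List String)) (corpus2 : List (List String)) (out : List String × List String) : Prop := out = topic_cls_alt text corpus1 corpus2
instance (text : String) (corpus1 : List (List String)) (corpus2 : List (List String)) (out : List String × List String) : Decidable (Spec_topic_cls text corpus1 corpus2 out) := by unfold Spec_topic_cls; infer_instance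

-- ===== CLAIM (what is proved, stated in full; the proofs are below) =====
def Claim_equal_topic_cls : Prop := ∀ (text : String) (corpus1 : List (List String)) (corpus2 : List (List String)), Dom_topic_cls text corpus1 corpus2 → Pre_topic_cls text corpus1 corpus2 → Spec_topic_cls text corpus1 corpus2 (topic_cls text corpus1 corpus2)

-- ===== LEMMAS AND PROOFS =====

-- the values appended by a matching pass: one ts-entry per matching corpus, in order
def pvVals (text : String) (cs : List (List String)) (ts : List String) (j : Int) : List String :=
  match cs with
  | [] => []
  | c :: rest =>
      if pvAnyIn text c then PySem.List.pyGetD ts j "" :: pvVals text rest ts (j + 1)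
      else pvVals text rest ts (j + 1)

theorem pvSubScanA_eq (text : String) (j : Int) (sc subt : List String) :
    pvSubScanA text j sc subt =
      if pvAnyIn text sc && !(subt.contains (PySem.List.pyGetD pvSubTopics j "")) then
        subt ++ [PySem.List.pyGetD pvSubTopics j ""]
      else subt := by
  induction sc with
  | nil => simp [pvSubScanA, pvAnyIn]
  | cons w rest ih =>
      by_cases h : PySem.Str.isIn w text = true <;>
        by_cases h2 : subt.contains (PySem.List.pyGetD pvSubTopics j "") = true <;>
          simp_all [pvSubScanA, pvAnyIn]

theorem pvWordScanA_eq (text : String) (i : Int) (c : List String) (c2 : List (List String))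
    (st : List String × List String) :
    pvWordScanA text i c c2 st =
      if pvAnyIn text c then (st.1 ++ [PySem.List.pyGetD pvTopics i ""], pvInnerA text c2 0 st.2)
      else st := by
  induction c with
  | nil => simp [pvWordScanA, pvAnyIn]
  | cons w rest ih =>
      by_cases h : PySem.Str.isIn w text = true
      · simp_all [pvWordScanA, pvAnyIn]
      · simp_all [pvWordScanA, pvAnyIn]

theorem mem_pvInnerA (text : String) (cs : List (List String)) (j : Int) (subt : List String)
    (x : String) (hx : x ∈ subt) : x ∈ pvInnerA text cs j subt := by
  induction cs generalizing j subt with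
  | nil => simpa [pvInnerA] using hx
  | cons c rest ih =>
      simp only [pvInnerA]
      apply ih
      rw [pvSubScanA_eq]
      split
      · exact List.mem_append_left _ hx
      · exact hx

theorem pvVals_mem_pvInnerA (text : String) (cs : List (List String)) (j : Int) (subt : List String)
    (x : String) (hx : x ∈ pvVals text cs pvSubTopics j) : x ∈ pvInnerA text cs j subt := by
  induction cs generalizing j subt with
  | nil => simp [pvVals] at hx
  | cons c rest ih =>
      simp only [pvInnerA]
      by_cases h : pvAnyIn text c = true
      · simp only [pvVals, h, if_pos, List.mem_cons] at hx
        rcases hx with rfl | hx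
        · apply mem_pvInnerA
          rw [pvSubScanA_eq]
          by_cases h2 : PySem.List.pyGetD pvSubTopics j "" ∈ subt
          · simp_all
          · simp_all
        · exact ih _ _ hx
      · simp only [pvVals, h, Bool.false_eq_true, if_neg, not_false_iff] at hx
        exact ih _ _ hx

theorem pvInnerA_eq_self (text : String) (cs : List (List String)) (j : Int) (subt : List String)
    (h : ∀ v ∈ pvVals text cs pvSubTopics j, v ∈ subt) : pvInnerA text cs j subt = subt := by
  induction cs generalizing j subt with
  | nil => simp [pvInnerA]
  | cons c rest ih =>
      simp only [pvInnerA]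
      by_cases hm : pvAnyIn text c = true
      · have hv : PySem.List.pyGetD pvSubTopics j "" ∈ subt := by
          apply h; simp [pvVals, hm]
        rw [pvSubScanA_eq]
        have hc : subt.contains (PySem.List.pyGetD pvSubTopics j "") = true :=
          List.contains_iff_mem.mpr hv
        simp only [hc, Bool.not_true, Bool.and_false, if_neg, Bool.false_eq_true, not_false_iff]
        apply ih
        intro v hvv
        apply h
        simp [pvVals, hm, hvv]
      · rw [pvSubScanA_eq]
        simp only [hm]
        simp only [Bool.false_and, if_neg, Bool.false_eq_true, not_false_iff]
        apply ih
        intro v hvv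
        apply h
        simpa [pvVals, hm] using hvv

theorem pvInnerA_idem (text : String) (cs : List (List String)) (j : Int) (subt : List String) :
    pvInnerA text cs j (pvInnerA text cs j subt) = pvInnerA text cs j subt :=
  pvInnerA_eq_self _ _ _ _ (fun _ hv => pvVals_mem_pvInnerA _ _ _ _ _ hv)

theorem pvInnerA_eq_append (text : String) (cs : List (List String)) (j : Int) (subt : List String)
    (hnd : (pvVals text cs pvSubTopics j).Nodup)
    (hdisj : ∀ v ∈ pvVals text cs pvSubTopics j, v ∉ subt) :
    pvInnerA text cs j subt = subt ++ pvVals text cs pvSubTopics j := by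
  induction cs generalizing j subt with
  | nil => simp [pvInnerA, pvVals]
  | cons c rest ih =>
      simp only [pvInnerA]
      by_cases hm : pvAnyIn text c = true
      · rw [pvSubScanA_eq]
        have hv : PySem.List.pyGetD pvSubTopics j "" ∉ subt := by
          apply hdisj; simp [pvVals, hm]
        have hc : subt.contains (PySem.List.pyGetD pvSubTopics j "") = false := by
          simpa using hv
        simp only [hm, hc, Bool.not_false, Bool.and_true, if_pos]
        rw [ih]
        · simp [pvVals, hm]
        · simp only [pvVals, hm, if_pos] at hnd
          exact hnd.of_cons
        · intro v hvv
          simp only [List.mem_append, List.mem_singleton]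
          rintro (hin | hEq)
          · exact hdisj v (by simp [pvVals, hm, hvv]) hin
          · simp only [pvVals, hm, if_pos, List.nodup_cons] at hnd
            exact hnd.1 (hEq ▸ hvv)
      · rw [pvSubScanA_eq]
        simp only [hm, Bool.false_and, if_neg, Bool.false_eq_true, not_false_iff]
        rw [ih]
        · simp [pvVals, hm]
        · simpa [pvVals, hm] using hnd
        · intro v hvv; exact hdisj v (by simpa [pvVals, hm] using hvv)

theorem pvOuterA_eq (text : String) (c2 : List (List String)) (cs : List (List String)) (n : Int)
    (t s : List String) :
    pvOuterA text cs c2 n (t, s) =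
      (t ++ pvVals text cs pvTopics n,
       if (pvVals text cs pvTopics n).isEmpty then s else pvInnerA text c2 0 s) := by
  induction cs generalizing n t s with
  | nil => simp [pvOuterA, pvVals]
  | cons c rest ih =>
      simp only [pvOuterA]
      rw [pvWordScanA_eq]
      by_cases hm : pvAnyIn text c = true
      · simp only [hm, if_pos]
        rw [ih]
        simp only [pvVals, hm, if_pos]
        have h2 : (if (pvVals text rest pvTopics (n + 1)).isEmpty = true then pvInnerA text c2 0 s
            else pvInnerA text c2 0 (pvInnerA text c2 0 s)) = pvInnerA text c2 0 s := by
          split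
          · rfl
          · exact pvInnerA_idem _ _ _ _
        rw [h2]
        simp
      · simp only [hm, Bool.false_eq_true, if_neg, not_false_iff]
        rw [ih]
        simp [pvVals, hm]

theorem pvVals_empty_iff (text : String) (cs : List (List String)) (ts : List String) (j : Int) :
    pvVals text cs ts j = [] ↔ ∀ c ∈ cs, pvAnyIn text c = false := by
  induction cs generalizing j with
  | nil => simp [pvVals]
  | cons c rest ih =>
      by_cases hm : pvAnyIn text c = true <;> simp [pvVals, hm, ih]

theorem pvVals_eq (text : String) (ts : List String) (cs : List (List String)) (n : Nat)
    (h : ∀ k < cs.length, pvAnyIn text (cs.getD k []) = true → n + k < ts.length) :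
    pvVals text cs ts (n : Int) =
      ((cs.zip (ts.drop n)).filter (fun p => pvAnyIn text p.1)).map (fun p => p.2) := by
  induction cs generalizing n with
  | nil => simp [pvVals]
  | cons c rest ih =>
      have hr : ∀ k < rest.length, pvAnyIn text (rest.getD k []) = true → (n + 1) + k < ts.length := by
        intro k hk hmk
        have := h (k + 1) (by simp; omega) (by simpa using hmk)
        omega
      have hcast : (n : Int) + 1 = ((n + 1 : Nat) : Int) := by push_cast; ring
      by_cases hm : pvAnyIn text c = true
      · have hn : n < ts.length := by
          have := h 0 (by simp) (by simpa using hm)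
          omega
        have hg : PySem.List.pyGetD ts ((n : Nat) : Int) "" = ts[n] := by
          rw [PySem.List.pyGetD_natCast]
          exact List.getD_eq_getElem _ _ hn
        rw [List.drop_eq_getElem_cons hn]
        simp only [pvVals, hm, if_pos, List.zip_cons_cons]
        rw [List.filter_cons_of_pos (by simpa using hm), List.map_cons, hcast, ih (n + 1) hr, hg]
      · simp only [pvVals, hm, Bool.false_eq_true, if_neg, not_false_iff]
        rw [hcast, ih (n + 1) hr]
        cases hdrop : ts.drop n with
        | nil =>
            have hl : ts.drop (n + 1) = [] := by
              have h1 : (ts.drop n).drop 1 = ts.drop (n + 1) := by rw [List.drop_drop]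
              rw [hdrop] at h1
              simpa using h1.symm
            rw [hl]
            simp
        | cons a l =>
            have hl : ts.drop (n + 1) = l := by
              have h1 : (ts.drop n).drop 1 = ts.drop (n + 1) := by rw [List.drop_drop]
              rw [hdrop] at h1
              simpa using h1.symm
            rw [hl]
            simp [hm]

theorem map_snd_zip_sublist {α β : Type} (cs : List α) (ts : List β) :
    ((cs.zip ts).map (fun p => p.2)).Sublist ts := by
  induction cs generalizing ts with
  | nil => simp
  | cons c rest ih =>
      cases ts with
      | nil => simp
      | cons a l => simpa using List.Sublist.cons₂ a (ih l)

-- ===== VERDICT (by name: the statement is the Claim_ definition above) =====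
theorem topic_cls_spec : Claim_equal_topic_cls := by
  intro text c1 c2 _hdom hpre
  unfold Spec_topic_cls topic_cls topic_cls_alt
  obtain ⟨h1, h2⟩ := hpre
  have htop : pvVals text c1 pvTopics (0 : Int) =
      ((c1.zip pvTopics).filter (fun p => pvAnyIn text p.1)).map (fun p => p.2) := by
    have := pvVals_eq text pvTopics c1 0 (by intro k hk hm; have := h1 k hk hm; simp [pvTopics]; omega)
    simpa using this
  rw [pvOuterA_eq, htop]
  by_cases he : (((c1.zip pvTopics).filter (fun p => pvAnyIn text p.1)).map (fun p => p.2)).isEmpty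
  · simp [he]
  · simp only [he, Bool.false_eq_true, if_neg, not_false_iff]
    have hex : ∃ c ∈ c1, pvAnyIn text c = true := by
      by_contra hno
      have : pvVals text c1 pvTopics (0 : Int) = [] := by
        rw [pvVals_empty_iff]
        intro c hc
        by_cases hb : pvAnyIn text c = true
        · exact absurd ⟨c, hc, hb⟩ hno
        · simpa using hb
      rw [this] at htop
      rw [← htop] at he
      simp at he
    have hsub : pvVals text c2 pvSubTopics (0 : Int) =
        ((c2.zip pvSubTopics).filter (fun p => pvAnyIn text p.1)).map (fun p => p.2) := by
      have := pvVals_eq text pvSubTopics c2 0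
        (by intro k hk hm; have := h2 hex k hk hm; simp [pvSubTopics]; omega)
      simpa using this
    have hnd : (pvVals text c2 pvSubTopics (0 : Int)).Nodup := by
      rw [hsub]
      refine List.Nodup.sublist ?_ (by decide : pvSubTopics.Nodup)
      exact ((List.filter_sublist).map _).trans (map_snd_zip_sublist c2 pvSubTopics)
    rw [pvInnerA_eq_append text c2 0 [] hnd (by simp)]
    simp [hsub]
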